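-- pv_equiv track=rewrite | github.com/RoryWilson92/Steganography | stegEncode.py | generateEncodedBytes
-- ===== SOURCE A (Python) =====
-- from textwrap import wrap
--
-- def generateEncodedBytes(msgBytes, imgBytes):
-- 	msgDualBits = []
-- 	encodedBytes = []
-- 	for i in range(len(msgBytes)):
-- 		dualBits = wrap(msgBytes[i], 2)
-- 		for c in range(4):
-- 			msgDualBits.append(dualBits[c])
-- 	for i in range(len(msgDualBits)):
-- 		newByte = (imgBytes[i])[:6] + msgDualBits[i]
-- 		encodedBytes.append(newByte)
-- 	for i in range(len(encodedBytes), len(imgBytes)):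
-- 		encodedBytes.append(imgBytes[i])
-- 	return encodedBytes
-- ===== SOURCE B (Python) =====
-- def generateEncodedBytes(msgBytes, imgBytes):
--     encodedBytes = [imgBytes[i][:6] + msgBytes[i // 4][2 * (i % 4):2 * (i % 4) + 2]
--                     for i in range(4 * len(msgBytes))]
--     encodedBytes += imgBytes[4 * len(msgBytes):]
--     return encodedBytes
-- ===== Notes on version B (the rewrite author's own statement) =====
-- stated objective: simpler
-- what changed: Drops the separate textwrap.wrap flattening pass and intermediate msgDualBits list: one arithmetically-indexed pass selects each 2-bit chunk directly via msgBytes[i//4][2*(i%4):2*(i%4)+2] and appends the untouched image tail with a single slice.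
import Mathlib
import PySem

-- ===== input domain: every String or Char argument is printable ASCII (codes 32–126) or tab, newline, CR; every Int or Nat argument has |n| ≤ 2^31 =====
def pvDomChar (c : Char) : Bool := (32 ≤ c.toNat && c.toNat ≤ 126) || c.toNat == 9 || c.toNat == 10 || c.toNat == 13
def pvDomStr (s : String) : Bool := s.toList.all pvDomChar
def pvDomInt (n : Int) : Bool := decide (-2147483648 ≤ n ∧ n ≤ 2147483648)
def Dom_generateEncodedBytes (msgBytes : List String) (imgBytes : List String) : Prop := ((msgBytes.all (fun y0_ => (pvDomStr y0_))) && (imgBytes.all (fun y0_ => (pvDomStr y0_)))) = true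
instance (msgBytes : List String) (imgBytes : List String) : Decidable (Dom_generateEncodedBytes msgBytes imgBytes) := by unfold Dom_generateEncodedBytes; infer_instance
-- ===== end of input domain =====

-- B replaces A's two-pass build (flatten all 2-char wrap chunks, then splice) by one
-- arithmetically-indexed pass plus a tail slice; objective: simpler, same cost.


-- ===== PORT A =====
-- textwrap.wrap(s, 2): exact on the strings Pre_ admits (whitespace- and hyphen-free),
-- where CPython's wrap equals splitting into consecutive 2-character pieces.
def pvWrap2 : List Char → List String
  | [] => []
  | [c] => [String.ofList [c]]
  | c :: d :: rest => String.ofList [c, d] :: pvWrap2 rest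

-- A's first double loop: flatten the first four wrap chunks of every message byte
-- (out-of-range chunk reads — an IndexError in Python — are totalised with getD ""
-- and excluded by Pre_)
def pvMsgDualBits (msgBytes : List String) : List String :=
  (List.range msgBytes.length).foldl (fun acc i =>
    let dualBits := pvWrap2 (msgBytes.getD i "").toList
    (List.range 4).foldl (fun acc2 c => acc2 ++ [dualBits.getD c ""]) acc) []

-- A's second loop: imgBytes[i][:6] + msgDualBits[i]
def pvEncLoop (imgBytes msgDualBits : List String) : List String :=
  (List.range msgDualBits.length).foldl (fun acc i =>
    acc ++ [String.ofList ((imgBytes.getD i "").toList.take 6 ++ (msgDualBits.getD i "").toList)]) []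

-- A's third loop: copy the untouched image bytes
def pvTailLoop (imgBytes encodedBytes : List String) : List String :=
  (List.range' encodedBytes.length (imgBytes.length - encodedBytes.length)).foldl
    (fun acc i => acc ++ [imgBytes.getD i ""]) encodedBytes

def generateEncodedBytes (msgBytes : List String) (imgBytes : List String) : List String :=
  pvTailLoop imgBytes (pvEncLoop imgBytes (pvMsgDualBits msgBytes))

-- ===== PORT B =====
def generateEncodedBytes_alt (msgBytes : List String) (imgBytes : List String) : List String :=
  ((List.range (4 * msgBytes.length)).map (fun i =>
    String.ofList ((imgBytes.getD i "").toList.take 6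
      ++ (((msgBytes.getD (i / 4) "").toList.drop (2 * (i % 4))).take 2))))
  ++ imgBytes.drop (4 * msgBytes.length)

-- ===== PRECONDITION & SPEC =====
-- Pre_ excludes exactly the inputs on which A may raise an IndexError or on which
-- textwrap.wrap's whitespace/hyphen word-breaking deviates from plain 2-character
-- chunking: every message string must be whitespace- and hyphen-free of length ≥ 7
-- (so wrap yields ≥ 4 plain 2-character chunks and dualBits[c] never raises), and
-- the image must hold at least 4 bytes per message byte (so imgBytes[i] never raises).
def Pre_generateEncodedBytes (msgBytes : List String) (imgBytes : List String) : Prop :=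
  (msgBytes.all (fun s => decide (7 ≤ s.toList.length) &&
      s.toList.all (fun c => !(PySem.Chars.isspace c) && !(c == '-')))
    && decide (4 * msgBytes.length ≤ imgBytes.length)) = true
instance (msgBytes : List String) (imgBytes : List String) : Decidable (Pre_generateEncodedBytes msgBytes imgBytes) := by unfold Pre_generateEncodedBytes; infer_instance

def pvWitness_generateEncodedBytes : List String × List String :=
  (["01000001"], ["00000000", "00000001", "00000010", "00000011", "11111111"])

def Spec_generateEncodedBytes (msgBytes : List String) (imgBytes : List String) (out : List String) : Prop := out = generateEncodedBytes_alt msgBytes imgBytes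
instance (msgBytes : List String) (imgBytes : List String) (out : List String) : Decidable (Spec_generateEncodedBytes msgBytes imgBytes out) := by unfold Spec_generateEncodedBytes; infer_instance

-- ===== CLAIM (what is proved, stated in full; the proofs are below) =====
def Claim_equal_generateEncodedBytes : Prop := ∀ (msgBytes : List String) (imgBytes : List String), Dom_generateEncodedBytes msgBytes imgBytes → Pre_generateEncodedBytes msgBytes imgBytes → Spec_generateEncodedBytes msgBytes imgBytes (generateEncodedBytes msgBytes imgBytes)

-- ===== LEMMAS AND PROOFS =====

-- any chunk of pvWrap2, read with getD, is the corresponding drop/take slice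
theorem pvWrap2_getD (l : List Char) (c : Nat) :
    (pvWrap2 l).getD c "" = String.ofList ((l.drop (2 * c)).take 2) := by
  induction l using pvWrap2.induct generalizing c with
  | case1 => simp [pvWrap2]
  | case2 a =>
    cases c with
    | zero => simp [pvWrap2]
    | succ c => simp [pvWrap2, Nat.mul_succ]
  | case3 a b rest ih =>
    cases c with
    | zero => simp [pvWrap2]
    | succ c =>
      show (pvWrap2 rest).getD c "" = _
      rw [ih c, show 2 * (c + 1) = (2 * c).succ.succ from by omega]
      simp

-- a loop that pushes one element per step is a map
theorem foldl_push_eq_map {α β : Type} (l : List α) (f : α → β) (acc : List β) :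
    l.foldl (fun a x => a ++ [f x]) acc = acc ++ l.map f := by
  induction l generalizing acc with
  | nil => simp
  | cons x xs ih => simp [List.foldl, ih]

-- A's double loop appends one 4-chunk block per message byte
theorem msgDualBits_flatMap (msgBytes : List String) (L : List Nat) (acc : List String) :
    L.foldl (fun acc i =>
      let dualBits := pvWrap2 (msgBytes.getD i "").toList
      (List.range 4).foldl (fun acc2 c => acc2 ++ [dualBits.getD c ""]) acc) acc
    = acc ++ L.flatMap (fun i =>
        (List.range 4).map (fun c => (pvWrap2 (msgBytes.getD i "").toList).getD c "")) := by
  induction L generalizing acc with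
  | nil => simp
  | cons x xs ih =>
    simp only [List.foldl_cons, List.flatMap_cons]
    rw [foldl_push_eq_map, ih, List.append_assoc]

-- flattening n blocks of 4 indexed reads is one arithmetically-indexed pass
theorem flatMap_blocks4 (n : Nat) (h : Nat → Nat → String) :
    (List.range n).flatMap (fun i => (List.range 4).map (h i))
      = (List.range (4 * n)).map (fun i => h (i / 4) (i % 4)) := by
  induction n with
  | zero => simp
  | succ n ih =>
    rw [show List.range (n + 1) = List.range n ++ [n] from List.range_succ,
      List.flatMap_append, ih,
      show 4 * (n + 1) = 4 * n + 4 from by ring, List.range_add, List.map_append]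
    congr 1
    simp only [List.flatMap_cons, List.flatMap_nil, List.append_nil, List.map_map]
    apply List.map_congr_left
    intro c hc
    simp only [List.mem_range] at hc
    have hd : (4 * n + c) / 4 = n := by omega
    have hm : (4 * n + c) % 4 = c := by omega
    simp [Function.comp, hd, hm]

-- the flattened chunk list, in closed form
theorem pvMsgDualBits_eq (msgBytes : List String) :
    pvMsgDualBits msgBytes = (List.range (4 * msgBytes.length)).map (fun i =>
      String.ofList (((msgBytes.getD (i / 4) "").toList.drop (2 * (i % 4))).take 2)) := by
  unfold pvMsgDualBits
  rw [msgDualBits_flatMap, List.nil_append,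
    flatMap_blocks4 msgBytes.length (fun i c => (pvWrap2 (msgBytes.getD i "").toList).getD c "")]
  apply List.map_congr_left
  intro i _
  exact pvWrap2_getD _ _

-- reading xs.getD along range' k (|xs| - k) is xs.drop k
theorem map_range'_getD {α : Type} [Inhabited α] (xs : List α) (d : α) (k : Nat) (hk : k ≤ xs.length) :
    (List.range' k (xs.length - k)).map (fun i => xs.getD i d) = xs.drop k := by
  apply List.ext_getElem
  · simp
  · intro j h1 h2
    simp only [List.getElem_map, List.getElem_range', List.getElem_drop]
    have hlt : k + j < xs.length := by simp at h2; omega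
    simp [List.getD_eq_getElem?_getD, List.getElem?_eq_getElem hlt]

theorem generateEncodedBytes_eq_alt (msgBytes imgBytes : List String)
    (hp : 4 * msgBytes.length ≤ imgBytes.length) :
    generateEncodedBytes msgBytes imgBytes = generateEncodedBytes_alt msgBytes imgBytes := by
  unfold generateEncodedBytes generateEncodedBytes_alt pvEncLoop pvTailLoop
  rw [pvMsgDualBits_eq]
  simp only [foldl_push_eq_map, List.nil_append, List.length_map, List.length_range]
  rw [map_range'_getD imgBytes "" _ hp]
  congr 1
  apply List.map_congr_left
  intro i hi
  simp only [List.mem_range] at hi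
  simp [List.getD_eq_getElem?_getD, hi]

-- ===== VERDICT (by name: the statement is the Claim_ definition above) =====
theorem generateEncodedBytes_spec : Claim_equal_generateEncodedBytes := by
  intro msgBytes imgBytes _ hpre
  unfold Spec_generateEncodedBytes
  unfold Pre_generateEncodedBytes at hpre
  simp only [Bool.and_eq_true, decide_eq_true_eq] at hpre
  exact generateEncodedBytes_eq_alt msgBytes imgBytes hpre.2
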